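-- pv_equiv track=rewrite | github.com/vova0808/KPI-Python-tasks | lab6_2.py | encode_morze
-- ===== SOURCE A (Python) =====
-- morse_code = {
--     "A" : ".-",
--     "B" : "-...",
--     "C" : "-.-.",
--     "D" : "-..",
--     "E" : ".",
--     "F" : "..-.",
--     "G" : "--.",
--     "H" : "....",
--     "I" : "..",
--     "J" : ".---",
--     "K" : "-.-",
--     "L" : ".-..",
--     "M" : "--",
--     "N" : "-.",
--     "O" : "---",
--     "P" : ".--.",
--     "Q" : "--.-",
--     "R" : ".-.",
--     "S" : "...",
--     "T" : "-",
--     "U" : "..-",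
--     "V" : "...-",
--     "W" : ".--",
--     "X" : "-..-",
--     "Y" : "-.--",
--     "Z" : "--.."
--
-- }
--
-- def encode_morze(text):
--     """
--         Function, that takes 1 argument - a string.
--         Return string of characters, that contains diagram of signal, that is respective to
--         transmitted string coded in Morze.
--         Pay no attention to the punctuation characters and to the others characters that are not in English alphabet
--     """
--     result = [] # list for output
--     tmp1 = [] #list for letters in upper register and spaces
--     tmp2 = [] #list for morzed letters and spaces
--     tmp3 = [] # list for morzed letters with additional spaces between letters
--
--     # iterate over text and if text have any digits return blank output
--     for i in text:
--         if i.isdigit():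
--             return ""
--
--     # check if text has any characters, and if it has't return blank output
--     if len(text) == 0:
--         return ""
--     else:
--         text = list(text) #convert text into list
--         for i in text:    #iterate over text
--             if i.isalpha(): #check if element is a letter
--                 tmp1.append(i.upper()) # if ist is, convert it to uppercase register and add it to tmp1 list
--             elif i == " ": # if element is a space between words, add it to tmp1 as is
--                 tmp1.append(i)
--             else: # all other elements passed
--                 pass
--     #iterate over tmp1
--     for i in tmp1:
--         if i in morse_code: #check if item in tmp1 is equal to one of the keys in morse_code
--             tmp2.append(morse_code[i]) # if it is, append to tmp2 value from respective key from morse_code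
--         else:
--             tmp2.append(i) #in other hand, add it to tmp2 as is
--
--     #iterate over tmp2, concantenate every elemnt with __ and append it to tmp3
--     for elem in tmp2:
--         tmp3.append(elem + "__")
--
--     #convert tmp3 to string
--     tmp3 = "".join(tmp3)
--
--     #convert tmp3 to list
--     tmp3 = list(tmp3)
--
--     #iterate over tmp3, encrypt his elemnts and add it to result
--     for char in tmp3:
--         if char == " ":
--             result.append("__")
--         elif char == ".":
--             result.append("^_")
--         elif char == "-":
--             result.append("^^^_")
--         else:
--             result.append(char)
--     result = "".join(result)
--     result = list(result)
--     result = result[:-3] #delete extra elements from the end of result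
--     return "".join(result)
-- ===== SOURCE B (Python) =====
-- morse_code = {
--     "A": ".-", "B": "-...", "C": "-.-.", "D": "-..", "E": ".", "F": "..-.",
--     "G": "--.", "H": "....", "I": "..", "J": ".---", "K": "-.-", "L": ".-..",
--     "M": "--", "N": "-.", "O": "---", "P": ".--.", "Q": "--.-", "R": ".-.",
--     "S": "...", "T": "-", "U": "..-", "V": "...-", "W": ".--", "X": "-..-",
--     "Y": "-.--", "Z": "--.."
-- }
--
-- # Precomputed char -> final signal table: both letter cases map straight to the
-- # fully expanded signal form, and the space maps to its "__" gap.  The runtime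
-- # function then never touches dots/dashes or case at all.
-- SIGNALS = {" ": "__"}
-- for _letter, _code in morse_code.items():
--     _sig = "".join("^_" if _s == "." else "^^^_" for _s in _code)
--     SIGNALS[_letter] = _sig
--     SIGNALS[_letter.lower()] = _sig
--
-- def encode_morze(text):
--     if any(c.isdigit() for c in text):
--         return ""
--     return "__".join(SIGNALS[c] for c in text if c in SIGNALS)[:-1]
-- ===== Notes on version B (the rewrite author's own statement) =====
-- stated objective: faster
-- what changed: B precomputes a direct char-to-signal table (both letter cases and the space mapped to their final expanded signal), so the function body is just a digit guard, one table-lookup comprehension joined with the separator, and a one-char trim, replacing A's five staged list passes (filter/uppercase, Morse dict lookup, per-element suffixing, char-by-char dot/dash expansion, three-char trim); the constant-factor win comes from eliminating the per-character expansion pass and intermediate lists.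
import Mathlib
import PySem

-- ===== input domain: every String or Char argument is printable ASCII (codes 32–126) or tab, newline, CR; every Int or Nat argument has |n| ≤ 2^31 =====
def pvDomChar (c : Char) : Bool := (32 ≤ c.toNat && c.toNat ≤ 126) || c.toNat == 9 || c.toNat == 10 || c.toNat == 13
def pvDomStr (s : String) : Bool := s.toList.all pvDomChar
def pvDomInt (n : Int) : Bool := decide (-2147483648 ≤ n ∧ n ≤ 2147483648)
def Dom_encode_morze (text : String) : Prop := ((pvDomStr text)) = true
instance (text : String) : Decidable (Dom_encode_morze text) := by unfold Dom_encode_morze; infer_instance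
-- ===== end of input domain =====

-- B replaces A's staged passes (filter/uppercase, Morse dict lookup, per-element suffixing,
-- char-by-char dot/dash expansion, three-char trim) by a precomputed char→signal table,
-- one lookup pass joined with "__" and a one-char trim (objective: faster by a constant factor, measured).
-- Single-character Python strings (the chars of the text, the dict keys) are modelled as Char,
-- and Python strings built internally as List Char, wrapped back with String.ofList at the end.

-- module-level data shared by both programs: the morse_code dict (single-char string keys modelled as Char)
def morse : PySem.Dict Char (List Char) := PySem.Dict.mk
  [('A', ".-".toList), ('B', "-...".toList), ('C', "-.-.".toList), ('D', "-..".toList),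
   ('E', ".".toList), ('F', "..-.".toList), ('G', "--.".toList), ('H', "....".toList),
   ('I', "..".toList), ('J', ".---".toList), ('K', "-.-".toList), ('L', ".-..".toList),
   ('M', "--".toList), ('N', "-.".toList), ('O', "---".toList), ('P', ".--.".toList),
   ('Q', "--.-".toList), ('R', ".-.".toList), ('S', "...".toList), ('T', "-".toList),
   ('U', "..-".toList), ('V', "...-".toList), ('W', ".--".toList), ('X', "-..-".toList),
   ('Y', "-.--".toList), ('Z', "--..".toList)]

-- ===== PORT A =====
def encode_morze (text : String) : String :=
  -- 'for i in text: if i.isdigit(): return ""' — an early-return scan, i.e. List.any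
  if text.toList.any PySem.Chars.isdigit then ""
  else if text.toList.length = 0 then ""
  else
    -- tmp1: uppercase letters and spaces
    let tmp1 : List Char := text.toList.foldl (fun acc i =>
      if PySem.Chars.isalpha i then acc ++ [PySem.Chars.upperChar i]
      else if i = ' ' then acc ++ [i]
      else acc) []
    -- tmp2: morse codes (dict hit) or the element as is
    let tmp2 : List (List Char) := tmp1.foldl (fun acc i =>
      match PySem.Dict.get? morse i with
      | some v => acc ++ [v]
      | none   => acc ++ [[i]]) []
    -- tmp3: every element concatenated with "__", then "".join (= flatten)
    let tmp3 : List (List Char) := tmp2.foldl (fun acc elem => acc ++ [elem ++ "__".toList]) []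
    let tmp3s : List Char := tmp3.flatten
    -- char-by-char signal expansion
    let result : List (List Char) := tmp3s.foldl (fun acc ch =>
      if ch = ' ' then acc ++ ["__".toList]
      else if ch = '.' then acc ++ ["^_".toList]
      else if ch = '-' then acc ++ ["^^^_".toList]
      else acc ++ [[ch]]) []
    -- result[:-3]
    String.ofList (PySem.List.slice result.flatten none (some (-3)))

-- ===== PORT B =====
-- B's module-level table: SIGNALS = {" ": "__"}; for each (letter, code) in morse_code,
-- SIGNALS[letter] = SIGNALS[letter.lower()] = code with '.' → "^_", '-' → "^^^_"
def signals : PySem.Dict Char (List Char) :=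
  (PySem.Dict.items morse).foldl
    (fun d kv =>
      let sig : List Char := kv.2.flatMap (fun s => if s = '.' then "^_".toList else "^^^_".toList)
      (d.insert kv.1 sig).insert (PySem.Chars.lowerChar kv.1) sig)
    (PySem.Dict.mk [(' ', "__".toList)])

def encode_morze_alt (text : String) : String :=
  if text.toList.any PySem.Chars.isdigit then ""
  else
    -- 'SIGNALS[c] for c in text if c in SIGNALS', joined with "__", then '[:-1]'
    let s : List Char :=
      PySem.Chars.join "__".toList (text.toList.filterMap (fun c => PySem.Dict.get? signals c))
    String.ofList (PySem.List.slice s none (some (-1)))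

-- ===== PRECONDITION & SPEC =====
def Spec_encode_morze (text : String) (out : String) : Prop := out = encode_morze_alt text
instance (text : String) (out : String) : Decidable (Spec_encode_morze text out) := by unfold Spec_encode_morze; infer_instance

-- ===== CLAIM (what is proved, stated in full; the proofs are below) =====
def Claim_equal_encode_morze : Prop := ∀ (text : String), Dom_encode_morze text → Spec_encode_morze text (encode_morze text)

-- ===== LEMMAS AND PROOFS =====

-- A's per-character expansion, named for the proofs
def charEnc (ch : Char) : List Char :=
  if ch = ' ' then "__".toList
  else if ch = '.' then "^_".toList
  else if ch = '-' then "^^^_".toList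
  else [ch]

-- A's tmp1 filter step, named for the proofs
def step1 (c : Char) : Option Char :=
  if PySem.Chars.isalpha c then some (PySem.Chars.upperChar c)
  else if c = ' ' then some c else none

-- dict hit or the element itself: what one tmp1 element becomes in tmp2
def gmap (i : Char) : List Char := PySem.Dict.getD morse i [i]

lemma tmp1_eq (cs : List Char) (acc : List Char) :
    cs.foldl (fun acc i =>
      if PySem.Chars.isalpha i then acc ++ [PySem.Chars.upperChar i]
      else if i = ' ' then acc ++ [i]
      else acc) acc = acc ++ cs.filterMap step1 := by
  induction cs generalizing acc with
  | nil => simp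
  | cons c t ih =>
    simp only [List.foldl_cons, List.filterMap_cons]
    by_cases ha : PySem.Chars.isalpha c
    · have h1 : step1 c = some (PySem.Chars.upperChar c) := by simp [step1, ha]
      simp [ha, h1, ih]
    · by_cases hs : c = ' '
      · subst hs
        have h1 : step1 ' ' = some ' ' := by decide
        have hna : PySem.Chars.isalpha ' ' = false := by decide
        simp [hna, h1, ih]
      · have h1 : step1 c = none := by simp [step1, ha, hs]
        simp [ha, hs, h1, ih]

lemma tmp2_eq (t1 : List Char) (acc : List (List Char)) :
    t1.foldl (fun acc i =>
      match PySem.Dict.get? morse i with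
      | some v => acc ++ [v]
      | none   => acc ++ [[i]]) acc = acc ++ t1.map gmap := by
  have hbody : (fun (acc : List (List Char)) (i : Char) =>
      match PySem.Dict.get? morse i with
      | some v => acc ++ [v]
      | none   => acc ++ [[i]]) = (fun acc i => acc ++ [gmap i]) := by
    funext acc i
    cases h : PySem.Dict.get? morse i <;> simp [gmap, PySem.Dict.getD, h]
  rw [hbody, PySem.List.foldl_append_singleton_eq_map]

lemma result_eq (j : List Char) (acc : List (List Char)) :
    j.foldl (fun acc ch =>
      if ch = ' ' then acc ++ ["__".toList]
      else if ch = '.' then acc ++ ["^_".toList]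
      else if ch = '-' then acc ++ ["^^^_".toList]
      else acc ++ [[ch]]) acc = acc ++ j.map charEnc := by
  have hbody : (fun (acc : List (List Char)) (ch : Char) =>
      if ch = ' ' then acc ++ ["__".toList]
      else if ch = '.' then acc ++ ["^_".toList]
      else if ch = '-' then acc ++ ["^^^_".toList]
      else acc ++ [[ch]]) = (fun acc ch => acc ++ [charEnc ch]) := by
    funext acc ch; simp only [charEnc]; split_ifs <;> rfl
  rw [hbody, PySem.List.foldl_append_singleton_eq_map]

-- expanding the flattened '<elem>__' blocks char by char = expanding each elem and re-appending "__"
lemma flat_expand (l : List (List Char)) :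
    ((l.map (fun e => e ++ "__".toList)).flatten).flatMap charEnc
      = (l.map (fun e => e.flatMap charEnc ++ "__".toList)).flatten := by
  have hsep : ("__".toList).flatMap charEnc = "__".toList := by decide
  induction l with
  | nil => rfl
  | cons a t ih => simp only [List.map_cons, List.flatten_cons, List.flatMap_append, ih, hsep]

-- join of '<e>__' blocks = "__".join(es) ++ "__"  (for a nonempty list)
lemma flatten_blocks (l : List (List Char)) (h : l ≠ []) :
    (l.map (fun e => e ++ "__".toList)).flatten = PySem.Chars.join "__".toList l ++ "__".toList := by
  induction l with
  | nil => exact absurd rfl h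
  | cons a t ih =>
    cases t with
    | nil => simp [PySem.Chars.join, List.intercalate]
    | cons b u =>
      have := ih (by simp)
      simp only [List.map_cons, List.flatten_cons] at this ⊢
      rw [this]
      simp [PySem.Chars.join, List.intercalate, List.intersperse, List.append_assoc]

-- the trailing trim: (I ++ "__")[:-3] = I[:-1]
lemma trim_eq (I : List Char) :
    PySem.List.slice (I ++ "__".toList) none (some (-3)) = I.dropLast := by
  rw [PySem.List.slice_to_neg_ofNat _ 3 (by omega)]
  have hlen : (I ++ "__".toList).length = I.length + 2 := by simp
  rw [hlen]
  rcases I with _ | ⟨x, xs⟩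
  · rfl
  · have h1 : (x :: xs).length + 2 - 3 = (x :: xs).length - 1 := by simp
    rw [h1, List.take_append_of_le_length (by omega), List.dropLast_eq_take]

-- the common tail: A's '<block>__' concatenation trimmed by 3 = "__".join trimmed by 1
lemma blocks_eq_join (E : List (List Char)) :
    PySem.List.slice ((E.map (fun e => e ++ "__".toList)).flatten) none (some (-3))
      = PySem.List.slice (PySem.Chars.join "__".toList E) none (some (-1)) := by
  rcases E with _ | ⟨e, es⟩
  · decide
  · rw [flatten_blocks _ (by simp), trim_eq, PySem.List.slice_to_neg_one]

-- per character (all of ASCII): B's table lookup = A's kept element expanded char by char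
set_option maxRecDepth 16384 in
lemma sig_char_nat : ∀ n : Nat, n ≤ 126 →
    PySem.Dict.get? signals (Char.ofNat n)
      = (step1 (Char.ofNat n)).map (fun i => (gmap i).flatMap charEnc) := by
  intro n h; interval_cases n <;> decide

lemma sig_char (c : Char) (h : pvDomChar c = true) :
    PySem.Dict.get? signals c = (step1 c).map (fun i => (gmap i).flatMap charEnc) := by
  have hb : c.toNat ≤ 126 := by
    simp only [pvDomChar, Bool.or_eq_true, Bool.and_eq_true, decide_eq_true_eq, beq_iff_eq] at h
    omega
  have := sig_char_nat c.toNat hb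
  rwa [Char.ofNat_toNat] at this

-- B's lookup pass over the text = A's kept elements, each expanded to its signal form
lemma lookup_eq (cs : List Char) (hdom : ∀ c ∈ cs, pvDomChar c = true) :
    cs.filterMap (fun c => PySem.Dict.get? signals c)
      = ((cs.filterMap step1).map gmap).map (fun e => e.flatMap charEnc) := by
  rw [List.map_map, List.map_filterMap]
  exact List.filterMap_congr (fun c hc => by
    rw [sig_char c (hdom c hc)]; rfl)

theorem encode_morze_eq (text : String) (hdom : Dom_encode_morze text) :
    encode_morze text = encode_morze_alt text := by
  have hdom' : ∀ c ∈ text.toList, pvDomChar c = true := by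
    have := hdom; unfold Dom_encode_morze pvDomStr at this
    exact fun c hc => List.all_eq_true.mp this c hc
  unfold encode_morze encode_morze_alt
  by_cases hd : text.toList.any PySem.Chars.isdigit
  · simp [hd]
  · simp only [hd, if_false, Bool.false_eq_true]
    by_cases h0 : text.toList.length = 0
    · have he : text.toList = [] := List.length_eq_zero_iff.mp h0
      rw [he]
      simp [PySem.Chars.join, List.intercalate]
      decide
    · simp only [h0, if_false]
      rw [tmp1_eq, tmp2_eq, PySem.List.foldl_append_singleton_eq_map, result_eq,
        lookup_eq _ hdom']
      simp only [List.nil_append]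
      rw [← List.flatMap_def, flat_expand]
      congr 1
      rw [← blocks_eq_join]
      congr 1
      congr 1
      simp only [List.map_map]
      exact List.map_congr_left (fun i _ => rfl)

-- ===== VERDICT (by name: the statement is the Claim_ definition above) =====
theorem encode_morze_spec : Claim_equal_encode_morze := by
  intro text hdom
  unfold Spec_encode_morze
  exact encode_morze_eq text hdom
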